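-- pv_equiv track=rewrite | github.com/Mouse-BB-Team/Bot-Detection | utils/preproccessing/preprocessor.py | __split_sets
-- ===== SOURCE A (Python) =====
-- def __split_sets(dataset: list, split_size: int):
--     total = 0
--     training_set = []
--     validation_set = []
--     for element in dataset:
--         if total < split_size:
--             training_set.append(element)
--             total += element['sequenceLength'][0]
--         else:
--             validation_set.append(element)
--     return training_set, validation_set
-- ===== SOURCE B (Python) =====
-- def __split_sets(dataset: list, split_size: int):
--     total = 0
--     i = 0
--     for element in dataset:
--         if total >= split_size:
--             break
--         total += element['sequenceLength'][0]
--         i += 1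
--     return dataset[:i], dataset[i:]
-- ===== Notes on version B (the rewrite author's own statement) =====
-- stated objective: simpler
-- what changed: Instead of maintaining two accumulator lists and appending to one or the other per element, B only computes the cutoff index (counting elements while the running total is below split_size, breaking once it crosses) and returns the two slices dataset[:i], dataset[i:].
import Mathlib
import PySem

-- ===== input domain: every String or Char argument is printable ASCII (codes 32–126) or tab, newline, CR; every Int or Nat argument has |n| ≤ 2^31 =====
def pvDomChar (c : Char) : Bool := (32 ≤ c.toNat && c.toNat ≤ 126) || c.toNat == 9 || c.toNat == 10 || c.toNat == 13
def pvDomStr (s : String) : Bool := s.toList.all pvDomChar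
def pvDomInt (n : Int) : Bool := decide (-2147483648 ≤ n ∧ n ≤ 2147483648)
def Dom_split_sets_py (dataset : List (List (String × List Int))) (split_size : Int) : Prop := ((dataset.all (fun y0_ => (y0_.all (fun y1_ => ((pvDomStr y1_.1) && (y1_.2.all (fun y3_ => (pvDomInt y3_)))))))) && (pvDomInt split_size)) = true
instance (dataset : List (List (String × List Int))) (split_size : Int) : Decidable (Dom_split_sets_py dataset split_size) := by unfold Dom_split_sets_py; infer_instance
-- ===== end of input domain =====

-- B computes only the cutoff index and returns two slices, instead of A's two growing accumulator lists.
-- Equivalence is about the return value; neither program mutates its argument.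

-- ===== PORT A =====
-- element['sequenceLength'][0]; exact under Pre_split_sets_py (under Pre_ every element that is
-- actually looked up has the key with a nonempty list, so the defaults are never hit).
def pvSeqLen0 (e : List (String × List Int)) : Int :=
  (PySem.List.pyGet? (PySem.Dict.getD (PySem.Dict.mk e) "sequenceLength" []) 0).getD 0

def split_sets_py (dataset : List (List (String × List Int))) (split_size : Int) :
    (List (List (String × List Int))) × (List (List (String × List Int))) :=
  let st := dataset.foldl
    (fun (st : Int × List (List (String × List Int)) × List (List (String × List Int))) element =>
      if st.1 < split_size then
        (st.1 + pvSeqLen0 element, st.2.1 ++ [element], st.2.2)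
      else
        (st.1, st.2.1, st.2.2 ++ [element]))
    (0, [], [])
  (st.2.1, st.2.2)

-- ===== PORT B =====
-- the for-loop with break of Source B: counts elements while the running total stays below split_size
def pvCutoff (ds : List (List (String × List Int))) (total split_size : Int) : Nat :=
  match ds with
  | [] => 0
  | e :: rest =>
      if total ≥ split_size then 0
      else 1 + pvCutoff rest
             -- element['sequenceLength'][0] as in Source B; exact under Pre_split_sets_py
             (total + (PySem.List.pyGet? (PySem.Dict.getD (PySem.Dict.mk e) "sequenceLength" []) 0).getD 0)
             split_size

def split_sets_py_alt (dataset : List (List (String × List Int))) (split_size : Int) :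
    (List (List (String × List Int))) × (List (List (String × List Int))) :=
  let i := pvCutoff dataset 0 split_size
  (dataset.take i, dataset.drop i)   -- dataset[:i], dataset[i:] with 0 ≤ i ≤ len dataset

-- ===== PRECONDITION & SPEC =====
-- Pre_-only helpers (not used by either port):
def pvHasLen (e : List (String × List Int)) : Bool :=
  match PySem.Dict.get? (PySem.Dict.mk e) "sequenceLength" with
  | some (_ :: _) => true
  | _ => false

def pvLen0 (e : List (String × List Int)) : Int :=
  (PySem.List.pyGet? (PySem.Dict.getD (PySem.Dict.mk e) "sequenceLength" []) 0).getD 0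

-- Pre_ excludes exactly the inputs on which Python A raises KeyError/IndexError: the first element
-- lacking a nonempty 'sequenceLength' is reached while the running total is still below split_size
-- (no earlier prefix sum has reached split_size). On every input where A returns, Pre_ holds.
def Pre_split_sets_py (dataset : List (List (String × List Int))) (split_size : Int) : Prop :=
  let p := dataset.takeWhile pvHasLen
  p.length = dataset.length ∨ ∃ k ≤ p.length, split_size ≤ ((p.take k).map pvLen0).sum
instance (dataset : List (List (String × List Int))) (split_size : Int) : Decidable (Pre_split_sets_py dataset split_size) := by unfold Pre_split_sets_py; infer_instance

def pvWitness_split_sets_py : (List (List (String × List Int))) × Int :=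
  ([[("sequenceLength", [2])], [("sequenceLength", [3])]], 2)

def Spec_split_sets_py (dataset : List (List (String × List Int))) (split_size : Int) (out : (List (List (String × List Int))) × (List (List (String × List Int)))) : Prop := out = split_sets_py_alt dataset split_size
instance (dataset : List (List (String × List Int))) (split_size : Int) (out : (List (List (String × List Int))) × (List (List (String × List Int)))) : Decidable (Spec_split_sets_py dataset split_size out) := by unfold Spec_split_sets_py; infer_instance

-- ===== CLAIM (what is proved, stated in full; the proofs are below) =====
def Claim_equal_split_sets_py : Prop := ∀ (dataset : List (List (String × List Int))) (split_size : Int), Dom_split_sets_py dataset split_size → Pre_split_sets_py dataset split_size → Spec_split_sets_py dataset split_size (split_sets_py dataset split_size)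

-- ===== LEMMAS AND PROOFS =====

theorem pvCutoff_of_ge (ds : List (List (String × List Int))) (total ss : Int)
    (h : total ≥ ss) : pvCutoff ds total ss = 0 := by
  cases ds with
  | nil => rfl
  | cons e rest => simp [pvCutoff, h]

theorem pvFold_eq (ss : Int) :
    ∀ (ds : List (List (String × List Int))) (total : Int)
      (tr va : List (List (String × List Int))),
      ds.foldl
        (fun (st : Int × List (List (String × List Int)) × List (List (String × List Int))) element =>
          if st.1 < ss then
            (st.1 + pvSeqLen0 element, st.2.1 ++ [element], st.2.2)
          else
            (st.1, st.2.1, st.2.2 ++ [element]))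
        (total, tr, va)
      = ((ds.foldl
            (fun (st : Int × List (List (String × List Int)) × List (List (String × List Int))) element =>
              if st.1 < ss then
                (st.1 + pvSeqLen0 element, st.2.1 ++ [element], st.2.2)
              else
                (st.1, st.2.1, st.2.2 ++ [element]))
            (total, tr, va)).1,
          tr ++ ds.take (pvCutoff ds total ss),
          va ++ ds.drop (pvCutoff ds total ss)) := by
  intro ds
  induction ds with
  | nil => intro total tr va; simp [pvCutoff]
  | cons e rest ih =>
    intro total tr va
    by_cases h : total < ss
    · have hlt : ¬ total ≥ ss := by omega
      simp only [List.foldl_cons, if_pos h, pvCutoff, if_neg hlt]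
      rw [ih (total + pvSeqLen0 e) (tr ++ [e]) va]
      simp [pvSeqLen0, Nat.add_comm 1]
    · have hge : total ≥ ss := by omega
      simp only [List.foldl_cons, if_neg h, pvCutoff, if_pos hge]
      rw [ih total tr (va ++ [e])]
      rw [pvCutoff_of_ge rest total ss hge]
      simp

-- ===== VERDICT (by name: the statement is the Claim_ definition above) =====
theorem split_sets_py_spec : Claim_equal_split_sets_py := by
  intro dataset split_size _ _
  unfold Spec_split_sets_py split_sets_py split_sets_py_alt
  rw [pvFold_eq split_size dataset 0 [] []]
  simp
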